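-- pv_equiv track=rewrite | github.com/GALJO/pythonBasics | olympiad_exercises/okiXIV/stage2/zyg.py | find_fraction
-- ===== SOURCE A (Python) =====
-- def find_fraction(_desc):
--     _res = {'p': 0, 'q': 0}
--     for _i in range(len(_desc)):
--         if _desc[_i] == 'G':
--             _res['p'] += 1
--         elif _desc[_i] == 'P':
--             _res['q'] += 1
--     return _res
-- ===== SOURCE B (Python) =====
-- def find_fraction(_desc):
--     return {key: sum(ch == target for ch in _desc)
--             for key, target in (('p', 'G'), ('q', 'P'))}
-- ===== Notes on version B (the rewrite author's own statement) =====
-- stated objective: simpler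
-- what changed: Replaces the index loop with a two-branch conditional over two mutable dict counters by a dict comprehension that, for each (key, target) pair, sums a boolean generator over the string.
import Mathlib
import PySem

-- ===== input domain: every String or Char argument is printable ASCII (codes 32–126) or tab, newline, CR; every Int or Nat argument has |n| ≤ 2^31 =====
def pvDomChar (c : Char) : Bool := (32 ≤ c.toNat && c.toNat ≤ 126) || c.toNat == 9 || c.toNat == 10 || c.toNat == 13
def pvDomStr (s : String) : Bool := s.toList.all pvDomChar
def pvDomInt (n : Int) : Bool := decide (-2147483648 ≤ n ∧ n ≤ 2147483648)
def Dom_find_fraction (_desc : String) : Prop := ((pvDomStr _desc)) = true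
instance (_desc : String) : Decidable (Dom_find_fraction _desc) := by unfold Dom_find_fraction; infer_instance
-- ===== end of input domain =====

-- B replaces A's per-character branch loop over two mutable counters by a dict
-- comprehension that sums a boolean generator per target character (objective: simpler).

-- ===== PORT A =====
-- dict {'p': 0, 'q': 0}; loop over range(len(_desc)); += via Dict.modify
def find_fraction (_desc : String) : List (String × Int) :=
  let res0 : PySem.Dict String Int := PySem.Dict.ofList [("p", 0), ("q", 0)]
  let res := (PySem.List.pyRange 0 (PySem.Str.len _desc) 1).foldl
    (fun d i =>
      let c := PySem.List.pyGetD _desc.toList i ' '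
      if c == 'G' then d.modify "p" 0 (· + 1)
      else if c == 'P' then d.modify "q" 0 (· + 1)
      else d) res0
  res.items

-- ===== PORT B =====
-- {key: sum(ch == target for ch in _desc) for key, target in (('p','G'), ('q','P'))}
def find_fraction_alt (_desc : String) : List (String × Int) :=
  [("p", 'G'), ("q", 'P')].map
    (fun kt => (kt.1, (_desc.toList.map (fun ch => if ch == kt.2 then (1 : Int) else 0)).sum))

-- ===== PRECONDITION & SPEC =====
def Spec_find_fraction (_desc : String) (out : List (String × Int)) : Prop := out = find_fraction_alt _desc
instance (_desc : String) (out : List (String × Int)) : Decidable (Spec_find_fraction _desc out) := by unfold Spec_find_fraction; infer_instance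

-- ===== CLAIM (what is proved, stated in full; the proofs are below) =====
def Claim_equal_find_fraction : Prop := ∀ (_desc : String), Dom_find_fraction _desc → Spec_find_fraction _desc (find_fraction _desc)

-- ===== LEMMAS AND PROOFS =====

-- Loop invariant for A: folding the step over any character list keeps the dict in
-- the shape {p: a, q: b} and adds the counts of 'G' and 'P'.
theorem pv_fold_counts (l : List Char) (a b : Int) :
    (l.foldl
      (fun d c =>
        if c == 'G' then d.modify "p" 0 (· + 1)
        else if c == 'P' then d.modify "q" 0 (· + 1)
        else d) (PySem.Dict.mk [("p", a), ("q", b)])) =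
      PySem.Dict.mk [("p", a + l.count 'G'), ("q", b + l.count 'P')] := by
  induction l generalizing a b with
  | nil => simp
  | cons c t ih =>
    by_cases hG : c = 'G'
    · subst hG
      simp only [List.foldl_cons, beq_self_eq_true, if_true]
      have : (PySem.Dict.mk [("p", a), ("q", b)]).modify "p" 0 (· + 1) =
          PySem.Dict.mk [("p", a + 1), ("q", b)] := by
        simp [PySem.Dict.modify, PySem.Dict.insert, PySem.Dict.contains, PySem.Dict.getD,
          PySem.Dict.get?]
      rw [this, ih]
      simp [add_comm]
      omega
    · by_cases hP : c = 'P'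
      · subst hP
        simp only [List.foldl_cons]
        have hne : ('P' == 'G') = false := by decide
        rw [hne]
        simp only [Bool.false_eq_true, if_false, beq_self_eq_true, if_true]
        have : (PySem.Dict.mk [("p", a), ("q", b)]).modify "q" 0 (· + 1) =
            PySem.Dict.mk [("p", a), ("q", b + 1)] := by
          simp [PySem.Dict.modify, PySem.Dict.insert, PySem.Dict.contains, PySem.Dict.getD,
            PySem.Dict.get?]
        rw [this, ih]
        simp [add_comm]
        omega
      · have h1 : (c == 'G') = false := by simp [hG]
        have h2 : (c == 'P') = false := by simp [hP]
        simp only [List.foldl_cons, h1, h2, Bool.false_eq_true, if_false]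
        rw [ih]
        simp [List.count_cons, h1, h2]

-- ===== VERDICT (by name: the statement is the Claim_ definition above) =====
theorem find_fraction_spec : Claim_equal_find_fraction := by
  intro s _
  unfold Spec_find_fraction find_fraction find_fraction_alt
  simp only [PySem.Str.len_eq]
  rw [show ((s.toList.length : Int)) = PySem.List.len s.toList from rfl]
  have hfold := PySem.List.foldl_pyRange_zero_pyGetD s.toList ' '
      (fun (d : PySem.Dict String Int) (c : Char) =>
        if c == 'G' then d.modify "p" 0 (· + 1)
        else if c == 'P' then d.modify "q" 0 (· + 1)
        else d)
      (PySem.Dict.ofList [("p", 0), ("q", 0)])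
  rw [hfold]
  rw [show (PySem.Dict.ofList [("p", (0:Int)), ("q", 0)]) = PySem.Dict.mk [("p", 0), ("q", 0)] from rfl]
  rw [pv_fold_counts]
  simp only [List.map_cons, List.map_nil, PySem.List.sum_map_ite_one_zero]
  simp [List.count]
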